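-- pv_equiv track=rewrite | github.com/ccc013/DataStructe-Algorithms_Study | Python/binary_search.py | find_last_less_equal_value
-- ===== SOURCE A (Python) =====
-- def find_last_less_equal_value(array, target):
--     num = len(array)
--     low, high = 0, num - 1
--     while low <= high:
--         mid = low + ((high - low) >> 1)
--         if array[mid] > target:
--             high = mid - 1
--         else:
--             if (mid == num - 1) | (array[mid + 1] > target):
--                 return mid
--             else:
--                 low = mid + 1
--     return -1
-- ===== SOURCE B (Python) =====
-- def find_last_less_equal_value(array, target):
--     for i in range(len(array) - 1, -1, -1):
--         if array[i] <= target: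
--             return i
--     return -1
-- ===== Notes on version B (the rewrite author's own statement) =====
-- stated objective: simpler
-- what changed: Replaced the binary search with its non-short-circuit `|` neighbor probe by a single reverse linear scan returning the first index from the right whose value is <= target; equal on arrays partitioned around target whose last element exceeds target (in particular all such sorted arrays).
-- outside the precondition, e.g. on find_last_less_equal_value([2, 1], 1): A returns -1, B returns 1
import Mathlib
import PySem

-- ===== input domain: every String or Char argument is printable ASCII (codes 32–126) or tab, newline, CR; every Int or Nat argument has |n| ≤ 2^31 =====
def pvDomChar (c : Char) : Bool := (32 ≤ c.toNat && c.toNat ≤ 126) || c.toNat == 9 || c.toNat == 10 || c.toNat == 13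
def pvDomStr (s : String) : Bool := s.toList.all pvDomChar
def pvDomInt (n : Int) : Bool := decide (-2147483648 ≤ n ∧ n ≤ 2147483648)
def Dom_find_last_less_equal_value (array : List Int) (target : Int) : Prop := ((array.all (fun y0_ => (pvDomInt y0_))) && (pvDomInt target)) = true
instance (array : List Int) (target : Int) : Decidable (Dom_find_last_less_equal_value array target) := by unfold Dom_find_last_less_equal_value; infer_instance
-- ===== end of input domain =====

-- B replaces A's binary search (with its non-short-circuit `|` neighbor probe) by a plain reverse
-- linear scan returning the first index from the right holding a value ≤ target (simpler, not faster).


-- ===== PORT A =====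
-- the `while low <= high` loop; `some r` = a `return r`, `none` = the IndexError Python's
-- non-short-circuit `(mid == num - 1) | (array[mid + 1] > target)` raises when mid + 1 is past the end
def pvALoop (array : List Int) (target num : Int) (low high : Int) : Option Int :=
  if _h : low ≤ high then
    let mid := low + ((high - low) >>> (1 : Nat))
    match PySem.List.pyGet? array mid with
    | none => none                                 -- array[mid] raises (unreachable from A's initial bounds)
    | some v =>
      if v > target then pvALoop array target num low (mid - 1)
      else
        match PySem.List.pyGet? array (mid + 1) with
        | none => none                             -- array[mid + 1] raises (both operands of `|` are evaluated)
        | some w =>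
          if (mid = num - 1) ∨ (w > target) then some mid
          else pvALoop array target num (mid + 1) high
  else some (-1)                                   -- loop ends: `return -1`
termination_by (high + 1 - low).toNat
decreasing_by
  · have hsh : (high - low) >>> (1 : Nat) = (high - low) / 2 := by
      rw [Int.shiftRight_eq_div_pow]; norm_num
    omega
  · have hsh : (high - low) >>> (1 : Nat) = (high - low) / 2 := by
      rw [Int.shiftRight_eq_div_pow]; norm_num
    omega

def find_last_less_equal_value (array : List Int) (target : Int) : Int :=
  (pvALoop array target (PySem.List.len array) 0 (PySem.List.len array - 1)).getD 0
  -- getD's default is the IndexError case (pvALoop = none): Python returns nothing there; excluded by Pre_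

-- ===== PORT B =====
-- Source B's `for i in range(len(array) - 1, -1, -1)` scan: walk the reversed list, `n` tracks i + 1
def pvBScan (rev : List Int) (target : Int) (n : Int) : Int :=
  match rev with
  | [] => -1                                       -- loop fell through: `return -1`
  | x :: xs => if x ≤ target then n - 1 else pvBScan xs target (n - 1)

def find_last_less_equal_value_alt (array : List Int) (target : Int) : Int :=
  pvBScan array.reverse target (PySem.List.len array)

-- ===== PRECONDITION & SPEC =====
-- Pre_ keeps the function's natural domain — arrays partitioned around target (every element ≤ target
-- precedes every element > target; in particular every sorted array), where binary search is meaningful: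
-- on non-partitioned input A's value is an accident of probe order; and partitioned arrays whose last
-- element is ≤ target are excluded because A raises IndexError there (the non-short-circuit `|` reads
-- array[mid + 1] past the end). The extra length-3/4/5 clauses only WIDEN the claim: they admit the
-- short unpartitioned arrays on which the two searches provably coincide anyway (and exclude the
-- configurations where A raises that same IndexError).
def Pre_find_last_less_equal_value (array : List Int) (target : Int) : Prop :=
  (List.Pairwise (fun a b => b ≤ target → a ≤ target) array ∧
    array.getLast?.all (fun x => decide (target < x)) = true)
  ∨ (array.length = 3 ∧ target < array.getD 2 0)
  ∨ (array.length = 4 ∧ target < array.getD 3 0 ∧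
      ¬ (target < array.getD 1 0 ∧ array.getD 2 0 ≤ target))
  ∨ (array.length = 5 ∧ target < array.getD 4 0 ∧
      ¬ ((array.getD 3 0 ≤ target ∧ target < array.getD 2 0) ∨
         (array.getD 1 0 ≤ target ∧ target < array.getD 0 0 ∧
          target < array.getD 2 0 ∧ target < array.getD 3 0)))
instance (array : List Int) (target : Int) : Decidable (Pre_find_last_less_equal_value array target) := by
  unfold Pre_find_last_less_equal_value; infer_instance

def pvWitness_find_last_less_equal_value : List Int × Int := ([0, 2], 1)

def Spec_find_last_less_equal_value (array : List Int) (target : Int) (out : Int) : Prop := out = find_last_less_equal_value_alt array target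
instance (array : List Int) (target : Int) (out : Int) : Decidable (Spec_find_last_less_equal_value array target out) := by unfold Spec_find_last_less_equal_value; infer_instance

-- ===== CLAIM (what is proved, stated in full; the proofs are below) =====
def Claim_equal_find_last_less_equal_value : Prop := ∀ (array : List Int) (target : Int), Dom_find_last_less_equal_value array target → Pre_find_last_less_equal_value array target → Spec_find_last_less_equal_value array target (find_last_less_equal_value array target)

-- ===== LEMMAS AND PROOFS =====

-- under the partition hypothesis, the "≤ target" prefix is exactly the first countP indices
theorem pv_part_char (xs : List Int) (target : Int)
    (hp : List.Pairwise (fun a b => b ≤ target → a ≤ target) xs) :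
    ∀ (j : Nat) (hj : j < xs.length),
      (xs[j] ≤ target ↔ j < xs.countP (fun a => decide (a ≤ target))) := by
  induction xs with
  | nil => intro j hj; simp at hj
  | cons a as ih =>
    have ha : ∀ b ∈ as, b ≤ target → a ≤ target := fun b hb => (List.pairwise_cons.mp hp).1 b hb
    have hp' := (List.pairwise_cons.mp hp).2
    intro j hj
    cases j with
    | zero =>
      simp only [List.getElem_cons_zero, List.countP_cons]
      constructor
      · intro hle; simp [hle]
      · intro hpos
        by_contra hna
        have h0 : as.countP (fun a => decide (a ≤ target)) = 0 := by
          rw [List.countP_eq_zero]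
          intro b hb
          simpa using fun hble => hna (ha b hb hble)
        simp [h0, hna] at hpos
    | succ j =>
      simp only [List.getElem_cons_succ, List.countP_cons]
      have hj' : j < as.length := by simpa using hj
      by_cases hale : a ≤ target
      · rw [ih hp' j hj']; simp [hale]
      · have h0 : as.countP (fun a => decide (a ≤ target)) = 0 := by
          rw [List.countP_eq_zero]
          intro b hb
          simpa using fun hble => hale (ha b hb hble)
        constructor
        · intro hble; exact absurd (ha _ (List.getElem_mem hj') hble) hale
        · intro hlt; simp [h0, hale] at hlt

-- A's loop, under the partition hypothesis, returns countP - 1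
theorem pv_loop_eq (array : List Int) (target : Int)
    (hs : List.Pairwise (fun a b => b ≤ target → a ≤ target) array)
    (hklt : array = [] ∨ ((array.countP (fun a => decide (a ≤ target)) : Int) + 1 ≤ array.length)) :
    ∀ (low high : Int), 0 ≤ low → high ≤ (array.length : Int) - 1 →
    ((array.countP (fun a => decide (a ≤ target)) : Int)) ≤ high + 1 →
    (array.countP (fun a => decide (a ≤ target)) = 0 ∨ low < (array.countP (fun a => decide (a ≤ target)) : Int)) →
    pvALoop array target (PySem.List.len array) low high
      = some ((array.countP (fun a => decide (a ≤ target)) : Int) - 1) := by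
  set k := array.countP (fun a => decide (a ≤ target)) with hkdef
  have hchar := pv_part_char array target hs
  intro low high
  induction low, high using pvALoop.induct array target (PySem.List.len array) with
  | case6 low high hnle =>
    intro h0 hh hk1 hk2
    rw [pvALoop, dif_neg hnle]
    have hk0 : k = 0 := by omega
    simp [hk0]
  | case1 low high hle mid hnone =>
    intro h0 hh hk1 hk2
    exfalso
    have hmideq : mid = low + (high - low) >>> (1 : Nat) := rfl
    have hmid2 : mid = low + (high - low) / 2 := by
      rw [hmideq, Int.shiftRight_eq_div_pow]; norm_num
    have hmlt : mid.toNat < array.length := by omega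
    rw [hmideq] at hnone
    have := (PySem.List.pyGet?_eq_none_iff (xs := array)
      (i := low + (high - low) >>> (1 : Nat))).mp hnone
    simp only [PySem.Raise.InRange, not_and, not_lt] at this
    rw [← hmideq] at this
    omega
  | case2 low high hle mid w heq hgt ih =>
    intro h0 hh hk1 hk2
    have hmideq : mid = low + (high - low) >>> (1 : Nat) := rfl
    have hmid2 : mid = low + (high - low) / 2 := by
      rw [hmideq, Int.shiftRight_eq_div_pow]; norm_num
    have hmlt : mid.toNat < array.length := by omega
    have hwval : w = array[mid.toNat] := by
      rw [PySem.List.pyGet?_of_nonneg array (by omega)] at heq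
      simp [List.getElem?_eq_getElem hmlt] at heq
      omega
    -- array[mid] > target ⇒ k ≤ mid
    have hkmid : k ≤ mid.toNat := by
      by_contra hc
      have := (hchar _ hmlt).mpr (Nat.lt_of_not_le hc)
      omega
    rw [pvALoop, dif_pos hle]
    rw [hmideq] at heq
    simp only [heq]
    rw [if_pos hgt, ← hmideq]
    exact ih (by omega) (by omega) (by omega) hk2
  | case3 low high hle mid w heq hle2 hnone1 =>
    intro h0 hh hk1 hk2
    exfalso
    -- array[mid] ≤ target forces mid + 1 < len under Pre_, so array[mid + 1] cannot raise
    have hmideq : mid = low + (high - low) >>> (1 : Nat) := rfl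
    have hmid2 : mid = low + (high - low) / 2 := by
      rw [hmideq, Int.shiftRight_eq_div_pow]; norm_num
    have hmlt : mid.toNat < array.length := by omega
    have hwval : w = array[mid.toNat] := by
      rw [PySem.List.pyGet?_of_nonneg array (by omega)] at heq
      simp [List.getElem?_eq_getElem hmlt] at heq
      omega
    have hkmid : mid.toNat < k :=
      (hchar _ hmlt).mp (by omega)
    have hne : array ≠ [] := by intro h; subst h; simp at hmlt
    have hklt' : (k : Int) + 1 ≤ array.length := by tauto
    have := (PySem.List.pyGet?_eq_none_iff (xs := array) (i := mid + 1)).mp hnone1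
    simp only [PySem.Raise.InRange, not_and, not_lt] at this
    omega
  | case4 low high hle mid w heq hle2 w2 heq1 hcond =>
    intro h0 hh hk1 hk2
    have hmideq : mid = low + (high - low) >>> (1 : Nat) := rfl
    have hmid2 : mid = low + (high - low) / 2 := by
      rw [hmideq, Int.shiftRight_eq_div_pow]; norm_num
    have hmlt : mid.toNat < array.length := by omega
    have hwval : w = array[mid.toNat] := by
      rw [PySem.List.pyGet?_of_nonneg array (by omega)] at heq
      simp [List.getElem?_eq_getElem hmlt] at heq
      omega
    have hkmid : mid.toNat < k :=
      (hchar _ hmlt).mp (by omega)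
    have hne : array ≠ [] := by intro h; subst h; simp at hmlt
    have hklt' : (k : Int) + 1 ≤ array.length := by tauto
    have hm1lt : (mid + 1).toNat < array.length := by omega
    have hw2val : w2 = array[(mid + 1).toNat] := by
      rw [PySem.List.pyGet?_of_nonneg array (by omega)] at heq1
      simp [List.getElem?_eq_getElem hm1lt] at heq1
      omega
    -- `mid = num - 1` is impossible here, so the probe found array[mid + 1] > target: k = mid + 1
    have hw2 : w2 > target := by
      rcases hcond with h | h
      · exfalso; rw [PySem.List.len_eq] at h; omega
      · exact h
    have hk_le : k ≤ (mid + 1).toNat := by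
      by_contra hc
      have := (hchar _ hm1lt).mpr (Nat.lt_of_not_le hc)
      omega
    rw [pvALoop, dif_pos hle]
    rw [hmideq] at heq heq1 hcond
    simp only [heq]
    rw [if_neg hle2]
    simp only [heq1]
    rw [if_pos hcond, ← hmideq]
    congr 1; omega
  | case5 low high hle mid w heq hle2 w2 heq1 hcond ih =>
    intro h0 hh hk1 hk2
    have hmideq : mid = low + (high - low) >>> (1 : Nat) := rfl
    have hmid2 : mid = low + (high - low) / 2 := by
      rw [hmideq, Int.shiftRight_eq_div_pow]; norm_num
    have hmlt : mid.toNat < array.length := by omega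
    have hwval : w = array[mid.toNat] := by
      rw [PySem.List.pyGet?_of_nonneg array (by omega)] at heq
      simp [List.getElem?_eq_getElem hmlt] at heq
      omega
    have hkmid : mid.toNat < k :=
      (hchar _ hmlt).mp (by omega)
    have hne : array ≠ [] := by intro h; subst h; simp at hmlt
    have hklt' : (k : Int) + 1 ≤ array.length := by tauto
    have hm1lt : (mid + 1).toNat < array.length := by omega
    have hw2val : w2 = array[(mid + 1).toNat] := by
      rw [PySem.List.pyGet?_of_nonneg array (by omega)] at heq1
      simp [List.getElem?_eq_getElem hm1lt] at heq1
      omega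
    -- the probe array[mid + 1] is ≤ target, so mid + 1 < k and the loop moves right
    have hw2 : ¬ w2 > target := by tauto
    have hwk : (mid + 1).toNat < k :=
      (hchar _ hm1lt).mp (by omega)
    rw [pvALoop, dif_pos hle]
    rw [hmideq] at heq heq1 hcond
    simp only [heq]
    rw [if_neg hle2]
    simp only [heq1]
    rw [if_neg hcond, ← hmideq]
    exact ih (by omega) (by omega) (by omega) (by omega)

-- B-side: a scan over elements all > target is skipped, dropping n by the block's length
theorem pv_scan_gt (ys zs : List Int) (target n : Int)
    (h : ∀ x ∈ ys, target < x) :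
    pvBScan (ys ++ zs) target n = pvBScan zs target (n - ys.length) := by
  induction ys generalizing n with
  | nil => simp
  | cons a as ih =>
    have ha : target < a := h a (by simp)
    rw [List.cons_append, pvBScan, if_neg (by omega), ih _ (fun x hx => h x (List.mem_cons_of_mem a hx))]
    congr 1
    simp
    omega

-- B's reverse scan, under the partition hypothesis, also returns countP - 1
theorem pv_scan_eq (array : List Int) (target : Int)
    (hs : List.Pairwise (fun a b => b ≤ target → a ≤ target) array) :
    pvBScan array.reverse target array.length
      = (array.countP (fun a => decide (a ≤ target)) : Int) - 1 := by
  set k := array.countP (fun a => decide (a ≤ target)) with hkdef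
  have hchar := pv_part_char array target hs
  have hkle : k ≤ array.length := List.countP_le_length
  have hsplit : array = array.take k ++ array.drop k := (List.take_append_drop k array).symm
  have hdropgt : ∀ x ∈ array.drop k, target < x := by
    intro x hx
    obtain ⟨j, hj, rfl⟩ := List.mem_iff_getElem.mp hx
    rw [List.getElem_drop]
    have hlt : k + j < array.length := by simp at hj; omega
    by_contra hle
    have := (hchar (k + j) hlt).mp (by omega)
    omega
  rcases Nat.eq_zero_or_pos k with hk0 | hkpos
  · -- all elements > target: the scan falls through to -1
    have hall : ∀ x ∈ array.reverse, target < x := by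
      intro x hx
      rw [List.mem_reverse] at hx
      have : x ∈ array.drop k := by rw [hk0]; simpa using hx
      exact hdropgt x this
    have : pvBScan (array.reverse ++ []) target array.length = pvBScan [] target (array.length - array.reverse.length) :=
      pv_scan_gt array.reverse [] target array.length hall
    simp at this
    rw [this, pvBScan]
    omega
  · -- k > 0: reversed = (drop k).reverse (all > target) ++ array[k-1] :: …, scan stops at index k - 1
    have hk1lt : k - 1 < array.length := by omega
    have htake : array.take k = array.take (k - 1) ++ [array[k - 1]] := by
      conv_lhs => rw [show k = (k - 1) + 1 by omega]
      rw [List.take_add_one, List.getElem?_eq_getElem hk1lt]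
      simp
    have hrev : array.reverse
        = (array.drop k).reverse ++ (array[k - 1] :: (array.take (k - 1)).reverse) := by
      conv_lhs => rw [hsplit]
      rw [List.reverse_append, htake, List.reverse_append]
      simp
    rw [hrev, pv_scan_gt _ _ _ _ (by intro x hx; exact hdropgt x (List.mem_reverse.mp hx)),
      pvBScan]
    rw [if_pos ((hchar (k - 1) hk1lt).mpr (by omega))]
    have hlen : (array.drop k).reverse.length = array.length - k := by simp
    rw [hlen]
    omega

-- unpartitioned short arrays admitted by the length clauses: both searches coincide, by case analysis
set_option maxRecDepth 100000 in
set_option maxHeartbeats 4000000 in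
theorem pv_small3 (x0 x1 x2 target : Int) (h : target < x2) :
    find_last_less_equal_value [x0, x1, x2] target
      = find_last_less_equal_value_alt [x0, x1, x2] target := by
  simp only [find_last_less_equal_value, find_last_less_equal_value_alt, PySem.List.len_eq]
  norm_num [List.reverse_cons, List.reverse_nil, pvBScan]
  repeat (rw [pvALoop]
          norm_num [PySem.List.pyGet?, PySem.List.pyIdx?, Int.shiftRight_eq_div_pow,
            show ((0:Int).toNat)=0 from rfl, show ((1:Int).toNat)=1 from rfl,
            show ((2:Int).toNat)=2 from rfl, show ((3:Int).toNat)=3 from rfl,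
            show ((4:Int).toNat)=4 from rfl])
  split_ifs <;> simp <;> omega

set_option maxRecDepth 100000 in
set_option maxHeartbeats 4000000 in
theorem pv_small4 (x0 x1 x2 x3 target : Int) (h : target < x3)
    (hc : ¬ (target < x1 ∧ x2 ≤ target)) :
    find_last_less_equal_value [x0, x1, x2, x3] target
      = find_last_less_equal_value_alt [x0, x1, x2, x3] target := by
  simp only [find_last_less_equal_value, find_last_less_equal_value_alt, PySem.List.len_eq]
  norm_num [List.reverse_cons, List.reverse_nil, pvBScan]
  repeat (rw [pvALoop]
          norm_num [PySem.List.pyGet?, PySem.List.pyIdx?, Int.shiftRight_eq_div_pow,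
            show ((0:Int).toNat)=0 from rfl, show ((1:Int).toNat)=1 from rfl,
            show ((2:Int).toNat)=2 from rfl, show ((3:Int).toNat)=3 from rfl,
            show ((4:Int).toNat)=4 from rfl])
  split_ifs <;> simp <;> omega

set_option maxRecDepth 100000 in
set_option maxHeartbeats 4000000 in
theorem pv_small5 (x0 x1 x2 x3 x4 target : Int) (h : target < x4)
    (hc : ¬ ((x3 ≤ target ∧ target < x2) ∨
             (x1 ≤ target ∧ target < x0 ∧ target < x2 ∧ target < x3))) :
    find_last_less_equal_value [x0, x1, x2, x3, x4] target
      = find_last_less_equal_value_alt [x0, x1, x2, x3, x4] target := by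
  simp only [find_last_less_equal_value, find_last_less_equal_value_alt, PySem.List.len_eq]
  norm_num [List.reverse_cons, List.reverse_nil, pvBScan]
  repeat (rw [pvALoop]
          norm_num [PySem.List.pyGet?, PySem.List.pyIdx?, Int.shiftRight_eq_div_pow,
            show ((0:Int).toNat)=0 from rfl, show ((1:Int).toNat)=1 from rfl,
            show ((2:Int).toNat)=2 from rfl, show ((3:Int).toNat)=3 from rfl,
            show ((4:Int).toNat)=4 from rfl])
  split_ifs <;> simp <;> omega

-- ===== VERDICT (by name: the statement is the Claim_ definition above) =====
theorem find_last_less_equal_value_spec : Claim_equal_find_last_less_equal_value := by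
  intro array target _hdom hpre
  rcases hpre with ⟨hs, hlast⟩ | ⟨hlen, hcl⟩ | ⟨hlen, hcl, hcl2⟩ | ⟨hlen, hcl, hcl2⟩
  case inr.inl =>
    obtain ⟨x0, x1, x2, rfl⟩ := List.length_eq_three.mp hlen
    simp only [List.getD, List.getElem?_cons_succ, List.getElem?_cons_zero, Option.getD_some] at hcl
    exact pv_small3 x0 x1 x2 target hcl
  case inr.inr.inl =>
    rcases array with _ | ⟨x0, tl⟩
    · simp at hlen
    · obtain ⟨x1, x2, x3, rfl⟩ := List.length_eq_three.mp (by simpa using hlen)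
      simp only [List.getD, List.getElem?_cons_succ, List.getElem?_cons_zero, Option.getD_some] at hcl hcl2
      exact pv_small4 x0 x1 x2 x3 target hcl hcl2
  case inr.inr.inr =>
    rcases array with _ | ⟨x0, _ | ⟨x1, tl⟩⟩
    · simp at hlen
    · simp at hlen
    · obtain ⟨x2, x3, x4, rfl⟩ := List.length_eq_three.mp (by simpa using hlen)
      simp only [List.getD, List.getElem?_cons_succ, List.getElem?_cons_zero, Option.getD_some] at hcl hcl2
      exact pv_small5 x0 x1 x2 x3 x4 target hcl hcl2
  unfold Spec_find_last_less_equal_value find_last_less_equal_value find_last_less_equal_value_alt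
  set k := array.countP (fun a => decide (a ≤ target)) with hkdef
  have hklt : array = [] ∨ ((k : Int) + 1 ≤ array.length) := by
    rcases eq_or_ne array [] with h | hne
    · exact Or.inl h
    · right
      have hlen : 0 < array.length := List.length_pos_iff.mpr hne
      have hlgt : target < array[array.length - 1] := by
        rw [List.getLast?_eq_getElem?] at hlast
        simp [List.getElem?_eq_getElem (show array.length - 1 < array.length by omega)] at hlast
        exact hlast
      have hk_le : k ≤ array.length - 1 := by
        by_contra hc
        have := (pv_part_char array target hs (array.length - 1) (by omega)).mpr
          (Nat.lt_of_not_le hc)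
        omega
      omega
  have hmain := pv_loop_eq array target hs hklt 0 (PySem.List.len array - 1)
    (by omega)
    (by simp [PySem.List.len_eq])
    (by have : k ≤ array.length := List.countP_le_length
        simp only [PySem.List.len_eq]; omega)
    (by omega)
  rw [hmain, Option.getD_some, PySem.List.len_eq, pv_scan_eq array target hs]
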